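-- pv_equiv track=rewrite | github.com/DelfsEngineering/fm-codespace | tools/fm_clipboard_import.py | find_tag_close
-- ===== SOURCE A (Python) =====
-- class ImporterError(RuntimeError):
--     pass
--
-- def find_tag_close(xml_text: str, start_index: int) -> int:
--     quote_char = ""
--     i = start_index + 1
--     length = len(xml_text)
--     while i < length:
--         char = xml_text[i]
--         if quote_char:
--             if char == quote_char:
--                 quote_char = ""
--         else:
--             if char in {'"', "'"}:
--                 quote_char = char
--             elif char == ">":
--                 return i
--         i += 1
--     raise ImporterError("Malformed XML: unterminated tag.")
-- ===== SOURCE B (Python) =====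
-- class ImporterError(RuntimeError):
--     pass
--
-- def _min_pos(p, q):
--     if p == -1:
--         return q
--     if q == -1:
--         return p
--     return p if p < q else q
--
-- def find_tag_close(xml_text: str, start_index: int) -> int:
--     i = start_index + 1
--     while True:
--         m = _min_pos(_min_pos(xml_text.find('"', i), xml_text.find("'", i)),
--                      xml_text.find('>', i))
--         if m == -1:
--             raise ImporterError("Malformed XML: unterminated tag.")
--         c = xml_text[m]
--         if c == '>':
--             return m
--         e = xml_text.find(c, m + 1)
--         if e == -1:
--             raise ImporterError("Malformed XML: unterminated tag.")
--         i = e + 1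
-- ===== Notes on version B (the rewrite author's own statement) =====
-- stated objective: alternative
-- what changed: Replaces A's per-character quote-state loop by a delimiter-jumping scanner: each iteration finds the earliest of '"', '\'', '>' with str.find, returns on '>', and otherwise jumps directly past the matching closing quote, so no per-character state machine remains.
-- outside the precondition, e.g. on find_tag_close('ab>', -2): A returns -1, B returns 2
import Mathlib
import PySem

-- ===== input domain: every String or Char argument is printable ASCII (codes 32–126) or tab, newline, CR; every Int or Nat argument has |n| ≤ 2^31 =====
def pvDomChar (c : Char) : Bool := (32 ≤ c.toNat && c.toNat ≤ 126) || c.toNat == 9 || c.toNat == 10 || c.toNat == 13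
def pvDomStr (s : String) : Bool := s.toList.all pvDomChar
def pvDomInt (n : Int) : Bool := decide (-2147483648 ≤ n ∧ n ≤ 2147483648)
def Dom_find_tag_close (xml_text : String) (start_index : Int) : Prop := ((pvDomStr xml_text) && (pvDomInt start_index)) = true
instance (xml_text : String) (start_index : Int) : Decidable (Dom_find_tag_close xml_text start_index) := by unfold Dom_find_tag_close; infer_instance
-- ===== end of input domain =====

-- B replaces A's per-character quote-state loop by a delimiter-jumping scanner built on str.find
-- (alternative algorithm, same cost); equivalence is about the return value on Pre_ (A raises outside it).


-- ===== PORT A =====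
-- A's while-loop: index i over the characters, quote_char state; returns the index of the
-- first '>' seen outside quotes, none = the ImporterError raise.
def pvALoop (cs : List Char) (length : Int) (quote_char : Option Char) (i : Int) : Option Int :=
  if _h : i < length then
    match PySem.List.pyGet? cs i with
    | none => none
    | some char =>
      match quote_char with
      | some q =>
        if char = q then pvALoop cs length none (i + 1)
        else pvALoop cs length (some q) (i + 1)
      | none =>
        if char = '"' ∨ char = '\'' then pvALoop cs length (some char) (i + 1)
        else if char = '>' then some i
        else pvALoop cs length none (i + 1)
  else none
termination_by (length - i).toNat
decreasing_by all_goals omega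

def find_tag_close (xml_text : String) (start_index : Int) : Int :=
  (pvALoop xml_text.toList (xml_text.toList.length : Int) none (start_index + 1)).getD 0

-- ===== PORT B =====
-- B's helper _min_pos: minimum of two find results, -1 meaning "not found".
def pvMinPos (p q : Int) : Int :=
  if p = -1 then q else if q = -1 then p else if p < q then p else q

-- B's while-True loop (fuel only makes the recursion total; B's loop advances i by ≥ 2
-- each iteration, so cs.length + 2 fuel is never exhausted): jump to the earliest of
-- '"', '\'', '>'; return on '>', else jump past the matching closing quote.
def pvBLoop (cs : List Char) (fuel : Nat) (i : Int) : Option Int :=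
  match fuel with
  | 0 => none
  | fuel + 1 =>
    let m := pvMinPos (pvMinPos (PySem.Chars.findFrom cs ['"'] i none)
                                (PySem.Chars.findFrom cs ['\''] i none))
                      (PySem.Chars.findFrom cs ['>'] i none)
    if m = -1 then none
    else
      match PySem.List.pyGet? cs m with
      | none => none
      | some c =>
        if c = '>' then some m
        else
          let e := PySem.Chars.findFrom cs [c] (m + 1) none
          if e = -1 then none else pvBLoop cs fuel (e + 1)

def find_tag_close_alt (xml_text : String) (start_index : Int) : Int :=
  (pvBLoop xml_text.toList (xml_text.toList.length + 2) (start_index + 1)).getD 0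

-- ===== PRECONDITION & SPEC =====
-- pvCloses: "an unquoted '>' occurs in this suffix", i.e. A (and B) return rather than raise.
def pvCloses (quote_char : Option Char) : List Char → Bool
  | [] => false
  | c :: rest =>
    match quote_char with
    | some q => pvCloses (if c = q then none else some q) rest
    | none =>
      if c = '"' ∨ c = '\'' then pvCloses (some c) rest
      else if c = '>' then true
      else pvCloses none rest

-- Pre_ excludes (a) the inputs on which A raises ImporterError (no unquoted '>' after
-- start_index, so neither program returns) and (b) start_index ≤ -2, where A's value comes
-- from Python's negative-index wraparound reading characters from the END of the string —
-- an artefact of A's raw indexing, not a position after start_index (see claim cites).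
def Pre_find_tag_close (xml_text : String) (start_index : Int) : Prop :=
  -1 ≤ start_index ∧ pvCloses none (xml_text.toList.drop (start_index + 1).toNat) = true
instance (xml_text : String) (start_index : Int) : Decidable (Pre_find_tag_close xml_text start_index) := by
  unfold Pre_find_tag_close; infer_instance

def pvWitness_find_tag_close : String × Int := ("<a href=\"u>v\">", 0)

def Spec_find_tag_close (xml_text : String) (start_index : Int) (out : Int) : Prop :=
  out = find_tag_close_alt xml_text start_index
instance (xml_text : String) (start_index : Int) (out : Int) : Decidable (Spec_find_tag_close xml_text start_index out) := by
  unfold Spec_find_tag_close; infer_instance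

-- ===== CLAIM (what is proved, stated in full; the proofs are below) =====
def Claim_equal_find_tag_close : Prop := ∀ (xml_text : String) (start_index : Int), Dom_find_tag_close xml_text start_index → Pre_find_tag_close xml_text start_index → Spec_find_tag_close xml_text start_index (find_tag_close xml_text start_index)

-- ===== LEMMAS AND PROOFS =====

def pvSpecial (c : Char) : Prop := c = '"' ∨ c = '\'' ∨ c = '>'

theorem pv_prefix_drop (cs : List Char) (c : Char) (t : Nat) :
    [c] <+: cs.drop t ↔ cs[t]? = some c := by
  cases hd : cs.drop t with
  | nil =>
    have : cs.length ≤ t := by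
      by_contra h
      have := List.length_drop (l := cs) (i := t)
      rw [hd] at this; simp at this; omega
    rw [List.getElem?_eq_none this]
    simp
  | cons a u =>
    have h0 : (cs.drop t)[0]? = some a := by rw [hd]; rfl
    rw [List.getElem?_drop] at h0
    simp only [Nat.add_zero] at h0
    rw [h0]
    simp [List.cons_prefix_cons, eq_comm]

theorem pv_singleton_infix_iff (c : Char) (l : List Char) : [c] <:+: l ↔ c ∈ l := by
  constructor
  · intro h; simpa using h.sublist
  · intro h
    obtain ⟨s, t, rfl⟩ := List.append_of_mem h
    exact ⟨s, t, by simp⟩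

theorem pv_mem_drop_iff (c : Char) (cs : List Char) (k : Nat) :
    c ∈ cs.drop k ↔ ∃ p : Nat, k ≤ p ∧ cs[p]? = some c := by
  rw [List.mem_iff_getElem?]
  constructor
  · rintro ⟨i, hi⟩
    rw [List.getElem?_drop] at hi
    exact ⟨k + i, by omega, hi⟩
  · rintro ⟨p, hkp, hp⟩
    refine ⟨p - k, ?_⟩
    rw [List.getElem?_drop, Nat.add_sub_cancel' hkp]
    exact hp

-- findFrom on a single character: the "not found" characterisation
theorem pv_ff_neg (cs : List Char) (c : Char) (k : Nat) (hk : k ≤ cs.length) :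
    PySem.Chars.findFrom cs [c] (k : Int) none = -1 ↔ ∀ p : Nat, k ≤ p → cs[p]? ≠ some c := by
  rw [PySem.Chars.findFrom_natCast_eq_neg_one_iff cs [c] k hk, pv_singleton_infix_iff,
    pv_mem_drop_iff]
  constructor
  · intro h p hkp hp; exact h ⟨p, hkp, hp⟩
  · rintro h ⟨p, hkp, hp⟩; exact h p hkp hp

-- findFrom on a single character: the "found" characterisation
theorem pv_ff_pos (cs : List Char) (c : Char) (k : Nat) (hk : k ≤ cs.length)
    (h : PySem.Chars.findFrom cs [c] (k : Int) none ≠ -1) :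
    ∃ e : Nat, PySem.Chars.findFrom cs [c] (k : Int) none = (e : Int) ∧ k ≤ e ∧ e < cs.length ∧
      cs[e]? = some c ∧ ∀ p : Nat, k ≤ p → p < e → cs[p]? ≠ some c := by
  obtain ⟨hle, hpre, hmin⟩ := PySem.Chars.findFrom_natCast_spec cs [c] k hk h
  have hr0 : 0 ≤ PySem.Chars.findFrom cs [c] (k : Int) none :=
    le_trans (Int.natCast_nonneg k) hle
  rw [pv_prefix_drop] at hpre
  refine ⟨(PySem.Chars.findFrom cs [c] (k : Int) none).toNat,
    (Int.toNat_of_nonneg hr0).symm, by omega, ?_, hpre, ?_⟩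
  · exact (List.getElem?_eq_some_iff.mp hpre).1
  · intro p hkp hpr hp
    exact hmin p hkp hpr ((pv_prefix_drop cs c p).mpr hp)

theorem pv_ff_ge (cs : List Char) (c : Char) (k : Nat) (hk : k ≤ cs.length) :
    -1 ≤ PySem.Chars.findFrom cs [c] (k : Int) none := by
  by_cases h : PySem.Chars.findFrom cs [c] (k : Int) none = -1
  · omega
  · have := (PySem.Chars.findFrom_natCast_spec cs [c] k hk h).1
    omega

-- pvMinPos arithmetic
theorem pv_minPos_ge (p q : Int) (hp : -1 ≤ p) (hq : -1 ≤ q) : -1 ≤ pvMinPos p q := by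
  unfold pvMinPos; split_ifs <;> omega

theorem pv_minPos_neg (p q : Int) (hp : -1 ≤ p) (hq : -1 ≤ q) :
    pvMinPos p q = -1 ↔ p = -1 ∧ q = -1 := by
  unfold pvMinPos; split_ifs <;> omega

theorem pv_minPos_eq (p q : Int) : pvMinPos p q = p ∨ pvMinPos p q = q := by
  unfold pvMinPos; split_ifs <;> omega

theorem pv_min3_le (dq sq gt x : Int) (hdq : -1 ≤ dq) (hsq : -1 ≤ sq) (hgt : -1 ≤ gt)
    (hx : x = dq ∨ x = sq ∨ x = gt) (hxn : x ≠ -1) :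
    pvMinPos (pvMinPos dq sq) gt ≤ x := by
  unfold pvMinPos
  rcases hx with rfl | rfl | rfl <;> split_ifs <;> omega

-- ===== A-side loop step and block lemmas =====

theorem pvALoop_stop (cs : List Char) (qc : Option Char) (i : Int)
    (h : (cs.length : Int) ≤ i) : pvALoop cs (cs.length : Int) qc i = none := by
  rw [pvALoop]; rw [dif_neg (by omega)]

theorem pvALoop_step_none (cs : List Char) (len i : Int) (c : Char)
    (h : i < len) (hg : PySem.List.pyGet? cs i = some c) :
    pvALoop cs len none i =
      if c = '"' ∨ c = '\'' then pvALoop cs len (some c) (i + 1)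
      else if c = '>' then some i
      else pvALoop cs len none (i + 1) := by
  rw [pvALoop, dif_pos h, hg]

theorem pvALoop_step_quote (cs : List Char) (len i : Int) (q c : Char)
    (h : i < len) (hg : PySem.List.pyGet? cs i = some c) :
    pvALoop cs len (some q) i =
      if c = q then pvALoop cs len none (i + 1)
      else pvALoop cs len (some q) (i + 1) := by
  rw [pvALoop, dif_pos h, hg]

theorem pv_get_nat (cs : List Char) (p : Nat) (h : p < cs.length) :
    PySem.List.pyGet? cs (p : Int) = some cs[p] := by
  rw [PySem.List.pyGet?_natCast, List.getElem?_eq_getElem h]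

theorem pv_cast_succ (n : Nat) : ((n : Int) + 1) = ((n + 1 : Nat) : Int) := by push_cast; ring

-- A's unquoted loop skips a block with no special characters
theorem pvALoop_skip (cs : List Char) : ∀ (d i : Nat), i + d ≤ cs.length →
    (∀ p : Nat, i ≤ p → p < i + d → ∀ c, cs[p]? = some c → ¬ pvSpecial c) →
    pvALoop cs (cs.length : Int) none (i : Int) = pvALoop cs (cs.length : Int) none ((i + d : Nat) : Int) := by
  intro d
  induction d with
  | zero => intro i _ _; rfl
  | succ d ih =>
    intro i hlen hclean
    have hi : i < cs.length := by omega
    have hc := hclean i (le_refl i) (by omega) cs[i] (List.getElem?_eq_getElem hi)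
    simp only [pvSpecial, not_or] at hc
    rw [pvALoop_step_none cs _ _ cs[i] (by exact_mod_cast hi) (pv_get_nat cs i hi),
      if_neg (by tauto), if_neg (by tauto), pv_cast_succ,
      ih (i + 1) (by omega) (fun p h1 h2 => hclean p (by omega) (by omega))]
    congr 2; omega

-- A's quoted loop dies when the quote never closes
theorem pvALoop_quote_none (cs : List Char) (q : Char) : ∀ (d i : Nat), cs.length ≤ i + d →
    (∀ p : Nat, i ≤ p → cs[p]? ≠ some q) →
    pvALoop cs (cs.length : Int) (some q) (i : Int) = none := by
  intro d
  induction d with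
  | zero => intro i hlen _; exact pvALoop_stop cs (some q) i (by exact_mod_cast hlen)
  | succ d ih =>
    intro i hlen hnone
    by_cases hi : i < cs.length
    · rw [pvALoop_step_quote cs _ _ q cs[i] (by exact_mod_cast hi) (pv_get_nat cs i hi),
        if_neg (fun hc => hnone i (le_refl i) (by rw [List.getElem?_eq_getElem hi, hc])),
        pv_cast_succ]
      exact ih (i + 1) (by omega) (fun p h1 => hnone p (by omega))
    · exact pvALoop_stop cs (some q) i (by exact_mod_cast by omega)

-- A's quoted loop jumps to just past the closing quote
theorem pvALoop_quote (cs : List Char) (q : Char) : ∀ (d i e : Nat), e = i + d →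
    cs[e]? = some q → (∀ p : Nat, i ≤ p → p < e → cs[p]? ≠ some q) →
    pvALoop cs (cs.length : Int) (some q) (i : Int) = pvALoop cs (cs.length : Int) none ((e + 1 : Nat) : Int) := by
  intro d
  induction d with
  | zero =>
    intro i e he hq _
    have hie : e = i := by omega
    subst hie
    have hi : e < cs.length := (List.getElem?_eq_some_iff.mp hq).1
    have hqi : cs[e] = q := by
      rw [List.getElem?_eq_getElem hi] at hq; simpa using hq
    rw [pvALoop_step_quote cs _ _ q cs[e] (by exact_mod_cast hi) (pv_get_nat cs e hi),
      if_pos hqi, pv_cast_succ]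
  | succ d ih =>
    intro i e he hq hmin
    have hie : i < e := by omega
    have he' : e < cs.length := (List.getElem?_eq_some_iff.mp hq).1
    have hi : i < cs.length := by omega
    rw [pvALoop_step_quote cs _ _ q cs[i] (by exact_mod_cast hi) (pv_get_nat cs i hi),
      if_neg (fun hc => hmin i (le_refl i) hie (by rw [List.getElem?_eq_getElem hi, hc])),
      pv_cast_succ]
    exact ih (i + 1) e (by omega) hq (fun p h1 h2 => hmin p (by omega) h2)

-- A's unquoted loop dies when no special character remains
theorem pvALoop_none (cs : List Char) : ∀ (d i : Nat), cs.length ≤ i + d →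
    (∀ p : Nat, i ≤ p → ∀ c, cs[p]? = some c → ¬ pvSpecial c) →
    pvALoop cs (cs.length : Int) none (i : Int) = none := by
  intro d
  induction d with
  | zero => intro i hlen _; exact pvALoop_stop cs none i (by exact_mod_cast hlen)
  | succ d ih =>
    intro i hlen hclean
    by_cases hi : i < cs.length
    · have hc := hclean i (le_refl i) cs[i] (List.getElem?_eq_getElem hi)
      simp only [pvSpecial, not_or] at hc
      rw [pvALoop_step_none cs _ _ cs[i] (by exact_mod_cast hi) (pv_get_nat cs i hi),
        if_neg (by tauto), if_neg (by tauto), pv_cast_succ]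
      exact ih (i + 1) (by omega) (fun p h1 => hclean p (by omega))
    · exact pvALoop_stop cs none i (by exact_mod_cast by omega)

-- ===== main equivalence of the two loops =====
theorem pv_main (cs : List Char) : ∀ (fuel i : Nat), i ≤ cs.length →
    cs.length + 1 ≤ fuel + i →
    pvALoop cs (cs.length : Int) none (i : Int) = pvBLoop cs fuel (i : Int) := by
  intro fuel
  induction fuel with
  | zero => intro i h1 h2; omega
  | succ fuel ih =>
    intro i hile hfuel
    rw [pvBLoop]
    have hdq := pv_ff_ge cs '"' i hile
    have hsq := pv_ff_ge cs '\'' i hile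
    have hgt := pv_ff_ge cs '>' i hile
    set dq := PySem.Chars.findFrom cs ['"'] (i : Int) none with hdqdef
    set sq := PySem.Chars.findFrom cs ['\''] (i : Int) none with hsqdef
    set gt := PySem.Chars.findFrom cs ['>'] (i : Int) none with hgtdef
    have hm1 : -1 ≤ pvMinPos dq sq := pv_minPos_ge dq sq hdq hsq
    set m := pvMinPos (pvMinPos dq sq) gt with hmdef
    have hmge : -1 ≤ m := pv_minPos_ge _ _ hm1 hgt
    by_cases hm : m = -1
    · -- nothing special left: A raises, B raises
      rw [if_pos hm]
      have h3 : dq = -1 ∧ sq = -1 ∧ gt = -1 := by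
        have h4 := (pv_minPos_neg _ _ hm1 hgt).1 hm
        have h5 := (pv_minPos_neg dq sq hdq hsq).1 h4.1
        exact ⟨h5.1, h5.2, h4.2⟩
      refine pvALoop_none cs (cs.length - i) i (by omega) ?_
      intro p hp c hpc hspec
      rcases hspec with h | h | h
      · exact ((pv_ff_neg cs '"' i hile).1 h3.1) p hp (h ▸ hpc)
      · exact ((pv_ff_neg cs '\'' i hile).1 h3.2.1) p hp (h ▸ hpc)
      · exact ((pv_ff_neg cs '>' i hile).1 h3.2.2) p hp (h ▸ hpc)
    · rw [if_neg hm]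
      have hcases : (m = dq ∧ dq ≠ -1) ∨ (m = sq ∧ sq ≠ -1) ∨ (m = gt ∧ gt ≠ -1) := by
        rcases pv_minPos_eq (pvMinPos dq sq) gt with h | h
        · rcases pv_minPos_eq dq sq with h' | h'
          · exact Or.inl ⟨by omega, by omega⟩
          · exact Or.inr (Or.inl ⟨by omega, by omega⟩)
        · exact Or.inr (Or.inr ⟨by omega, by omega⟩)
      obtain ⟨mc, hmcs, hmeq⟩ : ∃ mc : Char, pvSpecial mc ∧
          PySem.Chars.findFrom cs [mc] (i : Int) none = m := by
        rcases hcases with ⟨h, _⟩ | ⟨h, _⟩ | ⟨h, _⟩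
        · exact ⟨'"', Or.inl rfl, h.symm⟩
        · exact ⟨'\'', Or.inr (Or.inl rfl), h.symm⟩
        · exact ⟨'>', Or.inr (Or.inr rfl), h.symm⟩
      obtain ⟨mN, hmN, himN, hmNlen, hmNget, hmNmin⟩ :=
        pv_ff_pos cs mc i hile (by rw [hmeq]; exact hm)
      rw [hmeq] at hmN
      -- minimality of m over ALL special characters
      have hminall : ∀ p : Nat, i ≤ p → p < mN → ∀ c, cs[p]? = some c → ¬ pvSpecial c := by
        intro p hp hpm c hpc hspec
        have hf : PySem.Chars.findFrom cs [c] (i : Int) none ≠ -1 := by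
          intro hneg
          exact ((pv_ff_neg cs c i hile).1 hneg) p hp hpc
        have hmle : m ≤ PySem.Chars.findFrom cs [c] (i : Int) none := by
          refine pv_min3_le dq sq gt _ hdq hsq hgt ?_ hf
          rcases hspec with rfl | rfl | rfl
          · exact Or.inl hdqdef.symm
          · exact Or.inr (Or.inl hsqdef.symm)
          · exact Or.inr (Or.inr hgtdef.symm)
        obtain ⟨e0, he0, hie0, _, _, he0min⟩ := pv_ff_pos cs c i hile hf
        have he0p : e0 ≤ p := by
          by_contra hlt
          exact he0min p hp (by omega) hpc
        rw [he0] at hmle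
        omega
      -- walk A up to position mN, then unfold one step of A there
      rw [pvALoop_skip cs (mN - i) i (by omega)
          (fun p h1 h2 c hc => hminall p h1 (by omega) c hc),
        (by congr 1; omega : ((i + (mN - i) : Nat) : Int) = ((mN : Nat) : Int))]
      have hgetm : PySem.List.pyGet? cs m = some mc := by
        rw [hmN, PySem.List.pyGet?_natCast, hmNget]
      rw [hgetm]
      have hchar : cs[mN] = mc := by
        rw [List.getElem?_eq_getElem hmNlen] at hmNget; simpa using hmNget
      rw [pvALoop_step_none cs _ _ cs[mN] (by exact_mod_cast hmNlen) (pv_get_nat cs mN hmNlen)]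
      by_cases hgtc : mc = '>'
      · rw [if_neg (by rw [hchar, hgtc]; decide), if_pos (by rw [hchar, hgtc])]
        simp [hgtc, hmN]
      · have hq : mc = '"' ∨ mc = '\'' := by
          rcases hmcs with h | h | h
          · exact Or.inl h
          · exact Or.inr h
          · exact absurd h hgtc
        rw [if_pos (by rw [hchar]; exact hq)]
        simp only [if_neg hgtc]
        have hm1len : mN + 1 ≤ cs.length := by omega
        have hcast : (m + 1 : Int) = ((mN + 1 : Nat) : Int) := by rw [hmN]; push_cast; ring
        rw [hcast, hchar, pv_cast_succ]
        by_cases he : PySem.Chars.findFrom cs [mc] ((mN + 1 : Nat) : Int) none = -1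
        · rw [if_pos he]
          exact pvALoop_quote_none cs mc (cs.length - (mN + 1)) (mN + 1) (by omega)
            (fun p hp => ((pv_ff_neg cs mc (mN + 1) hm1len).1 he) p hp)
        · rw [if_neg he]
          obtain ⟨eN, heN, hieN, heNlen, heNget, heNmin⟩ := pv_ff_pos cs mc (mN + 1) hm1len he
          rw [pvALoop_quote cs mc (eN - (mN + 1)) (mN + 1) eN (by omega) heNget
              (fun p h1 h2 => heNmin p h1 h2),
            heN, pv_cast_succ]
          exact ih (eN + 1) (by omega) (by omega)

-- ===== VERDICT (by name: the statement is the Claim_ definition above) =====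
theorem find_tag_close_spec : Claim_equal_find_tag_close := by
  intro xml_text start_index _hdom hpre
  obtain ⟨h1, h2⟩ := hpre
  unfold Spec_find_tag_close find_tag_close find_tag_close_alt
  set cs := xml_text.toList with hcs
  have hne : cs.drop (start_index + 1).toNat ≠ [] := by
    intro h; rw [h] at h2; simp [pvCloses] at h2
  have hlt : (start_index + 1).toNat < cs.length := by
    by_contra h
    exact hne (List.drop_eq_nil_of_le (by omega))
  have hcast : start_index + 1 = (((start_index + 1).toNat : Nat) : Int) := by omega
  rw [hcast, pv_main cs (cs.length + 2) (start_index + 1).toNat (by omega) (by omega)]
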